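-- pv_equiv track=rewrite | github.com/DaveRoox/AdventOfCode | 2020/day21.py | possible_ingredients_by_allergen
-- ===== SOURCE A (Python) =====
-- def possible_ingredients_by_allergen(v):
--     ingrs_per_allergen = {}
--     for allergens, ingredients in v:
--         for allergen in allergens:
--             if allergen not in ingrs_per_allergen:
--                 ingrs_per_allergen[allergen] = set(ingredients)
--             else:
--                 ingrs_per_allergen[allergen] = ingrs_per_allergen[allergen].intersection(set(ingredients))
--     return ingrs_per_allergen
-- ===== SOURCE B (Python) =====
-- def possible_ingredients_by_allergen(v):
--     # Pass 1: group the ingredient sets per allergen (first-encounter key order).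
--     buckets = {}
--     for allergens, ingredients in v:
--         for allergen in allergens:
--             buckets.setdefault(allergen, []).append(set(ingredients))
--     # Pass 2: reduce each bucket by set intersection.
--     return {allergen: sets[0].intersection(*sets[1:])
--             for allergen, sets in buckets.items()}
-- ===== Notes on version B (the rewrite author's own statement) =====
-- stated objective: alternative
-- what changed: B separates the work into two passes: it first groups all ingredient sets per allergen into buckets, then reduces each bucket with set.intersection(*sets), instead of A's incremental intersection interleaved with the scan.
import Mathlib
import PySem

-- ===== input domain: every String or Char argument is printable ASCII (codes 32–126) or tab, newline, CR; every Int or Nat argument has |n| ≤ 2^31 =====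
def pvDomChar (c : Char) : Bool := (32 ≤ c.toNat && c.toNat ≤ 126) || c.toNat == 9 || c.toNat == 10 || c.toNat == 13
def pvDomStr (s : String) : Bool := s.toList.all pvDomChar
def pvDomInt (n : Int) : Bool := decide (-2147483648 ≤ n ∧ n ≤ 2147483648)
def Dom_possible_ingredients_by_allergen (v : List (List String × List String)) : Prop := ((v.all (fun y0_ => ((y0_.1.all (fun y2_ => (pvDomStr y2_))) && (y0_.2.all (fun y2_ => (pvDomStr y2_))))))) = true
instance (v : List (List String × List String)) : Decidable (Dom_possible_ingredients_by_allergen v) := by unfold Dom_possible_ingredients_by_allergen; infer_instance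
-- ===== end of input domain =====

-- B groups the ingredient sets per allergen first and reduces each bucket by intersection afterwards,
-- instead of A's incremental intersection interleaved with the scan (objective: alternative decomposition).


-- ===== PORT A =====
def possible_ingredients_by_allergen (v : List (List String × List String)) : List (String × List String) :=
  (v.foldl (fun d p =>
      p.1.foldl (fun d allergen =>
        if !(d.contains allergen) then
          d.insert allergen (PySem.Set.ofList p.2)
        else
          d.insert allergen (PySem.Set.inter (d.getD allergen []) (PySem.Set.ofList p.2)))
        d)
    PySem.Dict.empty).items

-- ===== PORT B =====
-- sets[0].intersection(*sets[1:]) of a bucket; buckets are never empty, the [] case is unreachable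
def pvInterAll (sets : List (List String)) : List String :=
  match sets with
  | [] => []
  | s :: rest => rest.foldl PySem.Set.inter s

def possible_ingredients_by_allergen_alt (v : List (List String × List String)) : List (String × List String) :=
  -- Pass 1: buckets.setdefault(allergen, []).append(set(ingredients))
  let buckets := v.foldl (fun d p =>
      p.1.foldl (fun d allergen =>
        d.modify allergen [] (fun l => l ++ [PySem.Set.ofList p.2])) d)
    PySem.Dict.empty
  -- Pass 2: {allergen: sets[0].intersection(*sets[1:]) for allergen, sets in buckets.items()}
  buckets.items.map (fun q => (q.1, pvInterAll q.2))

-- ===== PRECONDITION & SPEC =====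
def Spec_possible_ingredients_by_allergen (v : List (List String × List String)) (out : List (String × List String)) : Prop := out = possible_ingredients_by_allergen_alt v
instance (v : List (List String × List String)) (out : List (String × List String)) : Decidable (Spec_possible_ingredients_by_allergen v out) := by unfold Spec_possible_ingredients_by_allergen; infer_instance

-- ===== CLAIM (what is proved, stated in full; the proofs are below) =====
def Claim_equal_possible_ingredients_by_allergen : Prop := ∀ (v : List (List String × List String)), Dom_possible_ingredients_by_allergen v → Spec_possible_ingredients_by_allergen v (possible_ingredients_by_allergen v)

-- ===== LEMMAS AND PROOFS =====

-- map each bucket to its intersection, as a dict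
def pvMapD (d : PySem.Dict String (List (List String))) : PySem.Dict String (List String) :=
  PySem.Dict.mk (d.items.map (fun q => (q.1, pvInterAll q.2)))

def pvInv (d : PySem.Dict String (List (List String))) : Prop :=
  d.keys.Nodup ∧ ∀ p ∈ d.items, p.2 ≠ ([] : List (List String))

-- A's one-allergen step
def pvAStep (d : PySem.Dict String (List String)) (a : String) (s : List String) : PySem.Dict String (List String) :=
  if !(d.contains a) then d.insert a s
  else d.insert a (PySem.Set.inter (d.getD a []) s)

-- B's one-allergen step
def pvBStep (d : PySem.Dict String (List (List String))) (a : String) (s : List String) : PySem.Dict String (List (List String)) :=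
  d.modify a [] (fun l => l ++ [s])

lemma pvInterAll_append (x : List String) (rest : List (List String)) (s : List String) :
    pvInterAll (x :: (rest ++ [s])) = PySem.Set.inter (pvInterAll (x :: rest)) s := by
  simp [pvInterAll, List.foldl_append]

lemma pvMapD_contains (d : PySem.Dict String (List (List String))) (a : String) :
    (pvMapD d).contains a = d.contains a := by
  simp only [pvMapD, PySem.Dict.contains, List.any_map]
  rfl

lemma pvMapD_get? (d : PySem.Dict String (List (List String))) (a : String) :
    (pvMapD d).get? a = (d.get? a).map pvInterAll := by
  simp only [pvMapD, PySem.Dict.get?, List.find?_map]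
  have hpred : ((fun p : String × List String => p.1 == a) ∘
      fun q : String × List (List String) => (q.1, pvInterAll q.2)) =
      (fun p : String × List (List String) => p.1 == a) := rfl
  rw [hpred]
  cases List.find? (fun p : String × List (List String) => p.1 == a) d.items <;> rfl

lemma pvStep_eq (d : PySem.Dict String (List (List String))) (a : String) (s : List String)
    (h : pvInv d) :
    pvMapD (pvBStep d a s) = pvAStep (pvMapD d) a s ∧ pvInv (pvBStep d a s) := by
  unfold pvInv at h ⊢
  obtain ⟨hnd, hg⟩ := h
  by_cases hc : d.contains a = true
  · -- existing key: in-place replacement on both sides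
    have hsome : (d.get? a).isSome = true := by
      rw [PySem.Dict.contains_eq_isSome_get?] at hc; exact hc
    obtain ⟨vOld, hvOld⟩ := Option.isSome_iff_exists.mp hsome
    have hmem : (a, vOld) ∈ d.items := PySem.Dict.mem_items_of_get?_eq_some _ hvOld
    have hvne : vOld ≠ [] := hg _ hmem
    obtain ⟨x, rest, rfl⟩ : ∃ x rest, vOld = x :: rest := by
      cases vOld with
      | nil => exact absurd rfl hvne
      | cons x rest => exact ⟨x, rest, rfl⟩
    have hcm : (pvMapD d).contains a = true := by rw [pvMapD_contains]; exact hc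
    have hbd : pvBStep d a s = d.insert a ((x :: rest) ++ [s]) := by
      simp [pvBStep, PySem.Dict.modify, PySem.Dict.getD, hvOld]
    have had : pvAStep (pvMapD d) a s =
        (pvMapD d).insert a (PySem.Set.inter (pvInterAll (x :: rest)) s) := by
      simp [pvAStep, hcm, PySem.Dict.getD, pvMapD_get?, hvOld]
    refine ⟨?_, ?_, ?_⟩
    · -- dict equality
      rw [hbd, had]
      apply PySem.Dict.ext
      simp only [pvMapD]
      rw [PySem.Dict.items_insert_of_contains _ _ hc]
      rw [show (PySem.Dict.mk (d.items.map fun q => (q.1, pvInterAll q.2))).insert a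
            (PySem.Set.inter (pvInterAll (x :: rest)) s) =
          (pvMapD d).insert a (PySem.Set.inter (pvInterAll (x :: rest)) s) from rfl,
        PySem.Dict.items_insert_of_contains _ _ hcm]
      simp only [pvMapD, List.map_map]
      apply List.map_congr_left
      intro p hp
      by_cases hpa : (p.1 == a) = true
      · have hpeq : p = (a, x :: rest) := by
          have h2 := PySem.Dict.get?_of_mem_items (k := p.1) (v := p.2) _ hp hnd
          rw [eq_of_beq hpa, hvOld] at h2
          have h3 : p.2 = x :: rest := by injection h2.symm
          exact Prod.ext (eq_of_beq hpa) h3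
        subst hpeq
        simp only [Function.comp]
        simp only [hpa, if_true, List.cons_append]
        rw [pvInterAll_append]
      · simp [Function.comp, hpa]
    · -- keys stay Nodup
      rw [hbd]; exact PySem.Dict.nodup_keys_insert d a ((x :: rest) ++ [s]) hnd
    · -- values stay nonempty
      intro p hp
      rw [hbd, PySem.Dict.items_insert_of_contains _ _ hc] at hp
      simp only [List.mem_map] at hp
      obtain ⟨q, hq, rfl⟩ := hp
      by_cases hqa : (q.1 == a) = true
      · simp [hqa]
      · simpa [hqa] using hg _ hq
  · -- new key: both sides append
    have hc' : d.contains a = false := by simpa using hc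
    have hcm : (pvMapD d).contains a = false := by rw [pvMapD_contains]; exact hc'
    have hgd : d.getD a [] = [] := PySem.Dict.getD_of_not_contains _ _ hc'
    have hbd : pvBStep d a s = d.insert a [s] := by
      simp [pvBStep, PySem.Dict.modify, hgd]
    have had : pvAStep (pvMapD d) a s = (pvMapD d).insert a s := by
      simp [pvAStep, hcm]
    refine ⟨?_, ?_, ?_⟩
    · rw [hbd, had]
      apply PySem.Dict.ext
      simp only [pvMapD]
      rw [PySem.Dict.items_insert_of_not_contains _ _ hc']
      rw [show (PySem.Dict.mk (d.items.map fun q => (q.1, pvInterAll q.2))).insert a s =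
          (pvMapD d).insert a s from rfl,
        PySem.Dict.items_insert_of_not_contains _ _ hcm]
      simp [pvMapD, pvInterAll]
    · rw [hbd]; exact PySem.Dict.nodup_keys_insert d a [s] hnd
    · intro p hp
      rw [hbd, PySem.Dict.items_insert_of_not_contains _ _ hc'] at hp
      simp only [List.mem_append, List.mem_singleton] at hp
      rcases hp with hp | rfl
      · exact hg _ hp
      · simp

lemma pvInner (allergens : List String) (s : List String)
    (d : PySem.Dict String (List (List String))) (h : pvInv d) :
    pvMapD (allergens.foldl (fun d a => pvBStep d a s) d) =
      allergens.foldl (fun d a => pvAStep d a s) (pvMapD d) ∧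
    pvInv (allergens.foldl (fun d a => pvBStep d a s) d) := by
  induction allergens generalizing d with
  | nil => exact ⟨rfl, h⟩
  | cons a t ih =>
    obtain ⟨heq, hinv⟩ := pvStep_eq d a s h
    obtain ⟨ih1, ih2⟩ := ih _ hinv
    exact ⟨by simp only [List.foldl_cons, ih1, heq], ih2⟩

lemma pvOuter (v : List (List String × List String))
    (d : PySem.Dict String (List (List String))) (h : pvInv d) :
    pvMapD (v.foldl (fun d p =>
        p.1.foldl (fun d a => d.modify a [] (fun l => l ++ [PySem.Set.ofList p.2])) d) d) =
      v.foldl (fun d p =>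
        p.1.foldl (fun d a =>
          if !(d.contains a) then d.insert a (PySem.Set.ofList p.2)
          else d.insert a (PySem.Set.inter (d.getD a []) (PySem.Set.ofList p.2))) d)
        (pvMapD d) := by
  induction v generalizing d with
  | nil => rfl
  | cons p t ih =>
    obtain ⟨h1, h2⟩ := pvInner p.1 (PySem.Set.ofList p.2) d h
    simp only [List.foldl_cons]
    have h1' : pvMapD (p.1.foldl (fun d a => d.modify a [] fun l => l ++ [PySem.Set.ofList p.2]) d)
        = p.1.foldl (fun d a =>
            if !(d.contains a) then d.insert a (PySem.Set.ofList p.2)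
            else d.insert a (PySem.Set.inter (d.getD a []) (PySem.Set.ofList p.2))) (pvMapD d) := h1
    have h2' : pvInv (p.1.foldl (fun d a => d.modify a [] fun l => l ++ [PySem.Set.ofList p.2]) d) := h2
    rw [ih _ h2', h1']

-- ===== VERDICT (by name: the statement is the Claim_ definition above) =====
theorem possible_ingredients_by_allergen_spec : Claim_equal_possible_ingredients_by_allergen := by
  intro v _
  unfold Spec_possible_ingredients_by_allergen possible_ingredients_by_allergen
    possible_ingredients_by_allergen_alt
  have h := pvOuter v PySem.Dict.empty ⟨by simp [PySem.Dict.empty, PySem.Dict.keys], by simp [PySem.Dict.empty]⟩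
  have hm : pvMapD PySem.Dict.empty = PySem.Dict.empty := rfl
  rw [hm] at h
  rw [← h]
  rfl
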